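-- pv_equiv track=rewrite | github.com/PhilippRisius/nbgrader-jupyterquiz | src/nbgrader_jupyterquiz/grader/parse.py | split_questions
-- ===== SOURCE A (Python) =====
-- def split_questions(quiz_source: list[str]) -> list[list[str]]:
--     """
--     Split lines of a quiz region into individual question blocks.
--
--     Parameters
--     ----------
--     quiz_source : list[str]
--         Lines within a quiz delimiter region.
--
--     Returns
--     -------
--     list[list[str]]
--         Each inner list contains the question line followed by its answer lines.
--     """
--     questions = []
--     current_question: list[str] = []
--
--     for line in quiz_source:
--         if line.startswith("* "):
--             if current_question:
--                 questions.append(current_question)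
--             current_question = [line]
--         elif current_question:
--             if line.startswith("  +") or line.startswith("  -"):
--                 current_question.append(line)
--         # else: comment or blank line — ignore
--
--     if current_question:
--         questions.append(current_question)
--
--     return questions
-- ===== SOURCE B (Python) =====
-- def split_questions(quiz_source: list[str]) -> list[list[str]]:
--     """Two-phase: collect question-boundary indices, then slice-and-filter each segment."""
--     bounds = [(i, line) for i, line in enumerate(quiz_source) if line.startswith("* ")]
--     blocks = []
--     for k, (i, header) in enumerate(bounds):
--         end = bounds[k + 1][0] if k + 1 < len(bounds) else len(quiz_source)
--         answers = [l for l in quiz_source[i + 1:end]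
--                    if l.startswith("  +") or l.startswith("  -")]
--         blocks.append([header] + answers)
--     return blocks
-- ===== Notes on version B (the rewrite author's own statement) =====
-- stated objective: alternative
-- what changed: Replaced the accumulator/flush state machine by a two-phase computation: one enumerate pass collects the indices of '* ' boundary lines, then each block is built by slicing the open segment up to the next boundary and filtering it for answer lines.
import Mathlib
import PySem

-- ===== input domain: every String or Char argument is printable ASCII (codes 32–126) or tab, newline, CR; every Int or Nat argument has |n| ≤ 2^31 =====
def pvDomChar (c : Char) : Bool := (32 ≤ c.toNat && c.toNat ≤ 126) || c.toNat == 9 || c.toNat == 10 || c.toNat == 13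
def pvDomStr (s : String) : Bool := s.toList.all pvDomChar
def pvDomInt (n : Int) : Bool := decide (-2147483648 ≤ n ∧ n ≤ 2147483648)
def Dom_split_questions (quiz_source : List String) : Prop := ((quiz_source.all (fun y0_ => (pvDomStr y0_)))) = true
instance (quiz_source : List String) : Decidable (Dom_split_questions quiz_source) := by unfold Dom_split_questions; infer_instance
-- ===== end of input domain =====

-- B rebuilds the blocks in two phases (boundary indices, then slice-and-filter per segment)
-- instead of A's accumulator/flush state machine; same O(n) cost, different decomposition.

-- ===== PORT A =====
-- the body of A's for-loop (state = (questions, current_question))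
def aStep (st : List (List String) × List String) (line : String) :
    List (List String) × List String :=
  if PySem.Str.startswith line "* " then
    (if st.2 ≠ [] then st.1 ++ [st.2] else st.1, [line])
  else if st.2 ≠ [] then
    if PySem.Str.startswith line "  +" || PySem.Str.startswith line "  -" then
      (st.1, st.2 ++ [line])
    else st
  else st

def split_questions (quiz_source : List String) : List (List String) :=
  let st := quiz_source.foldl aStep ([], [])
  if st.2 ≠ [] then st.1 ++ [st.2] else st.1

-- ===== PORT B =====
def split_questions_alt (quiz_source : List String) : List (List String) :=
  let bounds := (PySem.List.enumerate quiz_source).filter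
      (fun p => PySem.Str.startswith p.2 "* ")
  (PySem.List.enumerate bounds).map (fun q =>
    let endi : Int := if q.1 + 1 < (bounds.length : Int)
      then (PySem.List.pyGetD bounds (q.1 + 1) (0, "")).1
      else (quiz_source.length : Int)
    let answers := (PySem.List.slice quiz_source (some (q.2.1 + 1)) (some endi)).filter
      (fun l => PySem.Str.startswith l "  +" || PySem.Str.startswith l "  -")
    q.2.2 :: answers)

-- ===== PRECONDITION & SPEC =====
def Spec_split_questions (quiz_source : List String) (out : List (List String)) : Prop := out = split_questions_alt quiz_source
instance (quiz_source : List String) (out : List (List String)) : Decidable (Spec_split_questions quiz_source out) := by unfold Spec_split_questions; infer_instance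

-- ===== CLAIM (what is proved, stated in full; the proofs are below) =====
def Claim_equal_split_questions : Prop := ∀ (quiz_source : List String), Dom_split_questions quiz_source → Spec_split_questions quiz_source (split_questions quiz_source)

-- ===== LEMMAS AND PROOFS =====

-- abbreviations for the two line predicates
def isQ (l : String) : Bool := PySem.Str.startswith l "* "
def isA (l : String) : Bool := PySem.Str.startswith l "  +" || PySem.Str.startswith l "  -"

-- the common specification: group lines into question blocks, recursing on the list
def Bspec : List String → List (List String)
  | [] => []
  | x :: xs =>
    if isQ x then
      (x :: (xs.takeWhile (fun l => !isQ l)).filter isA) :: Bspec (xs.dropWhile (fun l => !isQ l))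
    else Bspec xs
termination_by xs => xs.length
decreasing_by
  · exact Nat.lt_succ_of_le (List.length_dropWhile_le _ _)
  · exact Nat.lt_succ_self _

-- ----- A side -----

def finishA (st : List (List String) × List String) : List (List String) :=
  if st.2 ≠ [] then st.1 ++ [st.2] else st.1

-- what A's loop will still produce given a nonempty/empty current block and remaining lines
def restOf (cur : List String) (xs : List String) : List (List String) :=
  if cur = [] then Bspec xs
  else (cur ++ (xs.takeWhile (fun l => !isQ l)).filter isA) :: Bspec (xs.dropWhile (fun l => !isQ l))

theorem A_loop (xs : List String) : ∀ (qs : List (List String)) (cur : List String),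
    finishA (xs.foldl aStep (qs, cur)) = qs ++ restOf cur xs := by
  induction xs with
  | nil =>
    intro qs cur
    by_cases h : cur = [] <;> simp [finishA, restOf, Bspec, h]
  | cons x xs ih =>
    intro qs cur
    have hQ : PySem.Str.startswith x "* " = isQ x := rfl
    have hA : (PySem.Str.startswith x "  +" || PySem.Str.startswith x "  -") = isA x := rfl
    simp only [List.foldl_cons, aStep, hQ, hA]
    by_cases hq : isQ x
    · by_cases hc : cur = []
      · subst hc
        simp only [hq, if_true, ne_eq, not_true_eq_false, reduceIte, ih]
        simp [restOf, Bspec, hq]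
      · simp only [hq, ne_eq, hc, not_false_iff, if_pos, ih]
        simp [restOf, Bspec, hq, hc, List.takeWhile, List.dropWhile]
    · by_cases hc : cur = []
      · subst hc
        simp only [hq, if_false, ne_eq, not_true_eq_false, Bool.false_eq_true, ih]
        simp [restOf, Bspec, hq]
      · simp only [hq, Bool.false_eq_true, if_false, ne_eq, hc, not_false_iff, if_pos]
        by_cases ha : isA x
        · simp only [ha, if_true, ih]
          simp [restOf, hc, List.takeWhile, List.dropWhile, hq, ha]
        · simp only [ha, Bool.false_eq_true, if_false, ih]
          simp [restOf, hc, List.takeWhile, List.dropWhile, hq, ha]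

theorem A_eq_Bspec (xs : List String) : split_questions xs = Bspec xs := by
  have h := A_loop xs [] []
  simp only [finishA, restOf, List.nil_append] at h
  simpa [split_questions, finishA] using h

-- ----- B side -----

-- boundary list: the enumerated lines that start a question
def bnds (xs : List String) : List (Int × String) :=
  (PySem.List.enumerate xs).filter (fun p => isQ p.2)

-- pair each boundary with the index of the next boundary (or the end index e)
def pairNext : List (Int × String) → Int → List ((Int × String) × Int)
  | [], _ => []
  | [p], e => [(p, e)]
  | p :: q :: t, e => (p, q.1) :: pairNext (q :: t) e

-- one block from a (boundary, end-index) pair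
def gB (xs : List String) (pj : (Int × String) × Int) : List String :=
  pj.1.2 :: (PySem.List.slice xs (some (pj.1.1 + 1)) (some pj.2)).filter isA

theorem ZN (xs : List String) : ∀ (l pre : List (Int × String)),
    (PySem.List.enumerate l (pre.length : Int)).map (fun q =>
      let endi : Int := if q.1 + 1 < ((pre ++ l).length : Int)
        then (PySem.List.pyGetD (pre ++ l) (q.1 + 1) (0, "")).1
        else (xs.length : Int)
      gB xs (q.2, endi))
    = (pairNext l (xs.length : Int)).map (gB xs) := by
  intro l
  induction l with
  | nil => intro pre; simp [pairNext]
  | cons p rest ih =>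
    intro pre
    rw [PySem.List.enumerate_cons, List.map_cons]
    cases rest with
    | nil =>
      have hcond : ¬((pre.length : Int) + 1 < ((pre ++ [p]).length : Int)) := by
        simp
      simp [pairNext]
    | cons q t =>
      have hcond : (pre.length : Int) + 1 < ((pre ++ p :: q :: t).length : Int) := by
        simp only [List.length_append, List.length_cons]
        push_cast
        omega
      have hget : PySem.List.pyGetD (pre ++ p :: q :: t) ((pre.length : Int) + 1) (0, "") = q := by
        rw [show ((pre.length : Int) + 1) = ((pre.length + 1 : Nat) : Int) by push_cast; ring,
            PySem.List.pyGetD_natCast]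
        simp [List.getD]
      simp only [pairNext, List.map_cons]
      congr 1
      · simp [hget]
      · have h := ih (pre ++ [p])
        have e : (pre ++ [p]) ++ q :: t = pre ++ p :: q :: t := by simp
        rw [e] at h
        have e2 : (((pre ++ [p]).length : Nat) : Int) = (pre.length : Int) + 1 := by
          simp
        rw [e2] at h
        exact h

theorem Balt_eq (xs : List String) :
    split_questions_alt xs = (pairNext (bnds xs) (xs.length : Int)).map (gB xs) := by
  have h := ZN xs (bnds xs) []
  simp only [List.nil_append, List.length_nil, Nat.cast_zero] at h
  exact h

theorem enumerate_shift {α : Type} (xs : List α) (s : Int) :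
    PySem.List.enumerate xs s = (PySem.List.enumerate xs 0).map (fun p => (p.1 + s, p.2)) := by
  simp only [PySem.List.enumerate_eq_zipIdx_map, List.map_map]
  exact List.map_congr_left (fun p _ => by simp [Prod.ext_iff]; ring)

theorem bnds_cons (x : String) (xs : List String) :
    bnds (x :: xs) = (if isQ x then [((0 : Int), x)] else [])
      ++ (bnds xs).map (fun p => (p.1 + 1, p.2)) := by
  simp only [bnds, PySem.List.enumerate_cons, List.filter_cons, zero_add]
  rw [enumerate_shift xs 1, List.filter_map]
  have hc : ((fun p : Int × String => isQ p.2) ∘ (fun p : Int × String => (p.1 + 1, p.2)))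
      = fun p : Int × String => isQ p.2 := rfl
  rw [hc]
  by_cases hq : isQ x <;> simp [hq]

theorem pairNext_shift (l : List (Int × String)) (e : Int) :
    pairNext (l.map (fun p => (p.1 + 1, p.2))) (e + 1)
      = (pairNext l e).map (fun pj => ((pj.1.1 + 1, pj.1.2), pj.2 + 1)) := by
  induction l with
  | nil => simp [pairNext]
  | cons p l ih =>
    cases l with
    | nil => simp [pairNext]
    | cons q t => simpa [pairNext] using ih

theorem bnds_fst_nonneg (xs : List String) : ∀ p ∈ bnds xs, 0 ≤ p.1 := by
  intro p hp
  have hp' := List.mem_of_mem_filter hp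
  rcases (PySem.List.mem_enumerate_iff _ _ _).1 hp' with ⟨k, hk, rfl⟩
  simp

theorem pairNext_nonneg (l : List (Int × String)) (e : Int) (he : 0 ≤ e)
    (hl : ∀ p ∈ l, 0 ≤ p.1) : ∀ pj ∈ pairNext l e, 0 ≤ pj.1.1 ∧ 0 ≤ pj.2 := by
  induction l with
  | nil => simp [pairNext]
  | cons p l ih =>
    cases l with
    | nil =>
      intro pj hpj
      simp [pairNext] at hpj
      subst hpj
      exact ⟨hl p (by simp), he⟩
    | cons q t =>
      intro pj hpj
      simp only [pairNext, List.mem_cons] at hpj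
      rcases hpj with rfl | hpj
      · exact ⟨hl p (by simp), hl q (by simp)⟩
      · exact ih (fun r hr => hl r (List.mem_cons_of_mem _ hr)) pj hpj

theorem firstBound (xs : List String) :
    (bnds xs = [] → xs.takeWhile (fun l => !isQ l) = xs) ∧
    (∀ q t, bnds xs = q :: t → 0 ≤ q.1 ∧ xs.takeWhile (fun l => !isQ l) = xs.take q.1.toNat) := by
  induction xs with
  | nil => simp [bnds]
  | cons x xs ih =>
    by_cases hq : isQ x
    · refine ⟨fun h => ?_, fun q t h => ?_⟩
      · rw [bnds_cons] at h; simp [hq] at h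
      · rw [bnds_cons, if_pos hq, List.singleton_append] at h
        injection h with h1 h2
        subst h1
        exact ⟨le_refl 0, by simp [hq]⟩
    · have hb : bnds (x :: xs) = (bnds xs).map (fun p => (p.1 + 1, p.2)) := by
        rw [bnds_cons]; simp [hq]
      refine ⟨fun h => ?_, fun q t h => ?_⟩
      · rw [hb] at h
        have h0 : bnds xs = [] := by simpa using h
        rw [List.takeWhile_cons_of_pos (by simp [hq]), ih.1 h0]
      · rw [hb] at h
        cases hbx : bnds xs with
        | nil => rw [hbx] at h; simp at h
        | cons q0 t0 =>
          rw [hbx] at h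
          simp only [List.map_cons, List.cons.injEq] at h
          obtain ⟨rfl, -⟩ := h
          obtain ⟨h0, htw⟩ := ih.2 q0 t0 hbx
          refine ⟨by omega, ?_⟩
          rw [List.takeWhile_cons_of_pos (by simp [hq]), htw]
          have : (q0.1 + 1).toNat = q0.1.toNat + 1 := by omega
          rw [this, List.take_succ_cons]

theorem gB_shift (x : String) (xs : List String) (pj : (Int × String) × Int)
    (h1 : 0 ≤ pj.1.1) (h2 : 0 ≤ pj.2) :
    gB (x :: xs) ((pj.1.1 + 1, pj.1.2), pj.2 + 1) = gB xs pj := by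
  simp only [gB]
  have hs : PySem.List.slice (x :: xs) (some (pj.1.1 + 1 + 1)) (some (pj.2 + 1))
      = PySem.List.slice xs (some (pj.1.1 + 1)) (some pj.2) := by
    rw [PySem.List.slice_toNat _ (show (0:Int) ≤ pj.1.1 + 1 + 1 by omega)
          (show (0:Int) ≤ pj.2 + 1 by omega),
        PySem.List.slice_toNat _ (show (0:Int) ≤ pj.1.1 + 1 by omega)
          (show (0:Int) ≤ pj.2 by omega)]
    have e1 : (pj.1.1 + 1 + 1).toNat = (pj.1.1 + 1).toNat + 1 := by omega
    have e2 : (pj.2 + 1).toNat - (pj.1.1 + 1 + 1).toNat = pj.2.toNat - (pj.1.1 + 1).toNat := by omega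
    rw [e1, show (pj.2 + 1).toNat - ((pj.1.1 + 1).toNat + 1)
          = pj.2.toNat - (pj.1.1 + 1).toNat by omega, List.drop_succ_cons]
  rw [hs]

theorem mapped_shift (x : String) (xs : List String) (l : List (Int × String)) (e : Int)
    (he : 0 ≤ e) (hl : ∀ p ∈ l, 0 ≤ p.1) :
    ((pairNext l e).map (fun pj => ((pj.1.1 + 1, pj.1.2), pj.2 + 1))).map (gB (x :: xs))
      = (pairNext l e).map (gB xs) := by
  rw [List.map_map]
  refine List.map_congr_left (fun pj hpj => ?_)
  obtain ⟨h1, h2⟩ := pairNext_nonneg l e he hl pj hpj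
  exact gB_shift x xs pj h1 h2

theorem Balt_cons (x : String) (xs : List String) :
    (pairNext (bnds (x :: xs)) ((x :: xs).length : Int)).map (gB (x :: xs))
      = if isQ x then
          (x :: (xs.takeWhile (fun l => !isQ l)).filter isA)
            :: (pairNext (bnds xs) (xs.length : Int)).map (gB xs)
        else (pairNext (bnds xs) (xs.length : Int)).map (gB xs) := by
  have hlen : (((x :: xs).length : Nat) : Int) = (xs.length : Int) + 1 := by
    simp
  rw [bnds_cons]
  by_cases hq : isQ x
  · rw [if_pos hq, if_pos hq, List.singleton_append]
    rcases hbx : bnds xs with _ | ⟨q0, t0⟩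
    · rw [List.map_nil]
      have htw := (firstBound xs).1 hbx
      have hs : PySem.List.slice (x :: xs) (some ((0:Int) + 1))
          (some (((x :: xs).length : Nat) : Int)) = xs := by
        rw [PySem.List.slice_toNat _ (show (0:Int) ≤ 0 + 1 by omega)
              (show (0:Int) ≤ (((x :: xs).length : Nat) : Int) by positivity)]
        simp
      simp only [pairNext, List.map_cons, List.map_nil, gB, hs, htw]
    · obtain ⟨h0, htw⟩ := (firstBound xs).2 q0 t0 hbx
      have hnn : ∀ p ∈ q0 :: t0, 0 ≤ p.1 := by
        rw [← hbx]; exact bnds_fst_nonneg xs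
      rw [List.map_cons]
      show (((0, x), q0.1 + 1)
          :: pairNext ((q0 :: t0).map (fun p => (p.1 + 1, p.2))) (((x :: xs).length : Nat) : Int)).map
            (gB (x :: xs)) = _
      rw [hlen, pairNext_shift, List.map_cons,
          mapped_shift x xs (q0 :: t0) (xs.length : Int) (by positivity) hnn, ← hbx]
      have hs : PySem.List.slice (x :: xs) (some ((0:Int) + 1)) (some (q0.1 + 1))
          = xs.take q0.1.toNat := by
        rw [PySem.List.slice_toNat _ (show (0:Int) ≤ 0 + 1 by omega)
              (show (0:Int) ≤ q0.1 + 1 by omega)]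
        have e2 : (q0.1 + 1).toNat - ((0:Int) + 1).toNat = q0.1.toNat := by omega
        rw [e2]
        simp
      congr 1
      simp only [gB, hs, htw]
  · rw [if_neg hq, if_neg hq, List.nil_append, hlen, pairNext_shift]
    exact mapped_shift x xs (bnds xs) (xs.length : Int) (by positivity) (bnds_fst_nonneg xs)

theorem Bspec_dropWhile (xs : List String) :
    Bspec (xs.dropWhile (fun l => !isQ l)) = Bspec xs := by
  induction xs with
  | nil => simp
  | cons x xs ih =>
    by_cases hq : isQ x
    · simp [List.dropWhile, hq]
    · rw [List.dropWhile_cons_of_pos (by simp [hq]), ih, Bspec, if_neg (by simp [hq])]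

theorem B_eq_Bspec (xs : List String) :
    (pairNext (bnds xs) (xs.length : Int)).map (gB xs) = Bspec xs := by
  induction xs with
  | nil => simp [bnds, pairNext, Bspec]
  | cons x xs ih =>
    rw [Balt_cons, ih]
    by_cases hq : isQ x
    · rw [if_pos hq, Bspec, if_pos hq, Bspec_dropWhile]
    · rw [if_neg hq, Bspec, if_neg hq]

-- ===== VERDICT (by name: the statement is the Claim_ definition above) =====
theorem split_questions_spec : Claim_equal_split_questions := by
  intro xs _
  show split_questions xs = split_questions_alt xs
  rw [A_eq_Bspec, Balt_eq, B_eq_Bspec]
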